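-- pv_equiv track=rewrite | github.com/suchithnarayan/actions-guard-hub | utils/overview_generator.py | _extract_sha_from_filename
-- ===== SOURCE A (Python) =====
-- def _extract_sha_from_filename(filename: str) -> str:
--     """
--     Extract SHA from filename if present.
--
--     Args:
--         filename: Name of the scan result file
--
--     Returns:
--         Extracted SHA or "Unknown"
--     """
--     try:
--         # Look for SHA-like patterns in filename
--         parts = filename.replace('.json', '').split('-')
--
--         for part in parts:
--             # Check if part looks like a SHA (7+ hex characters)
--             if len(part) >= 7 and all(c in '0123456789abcdef' for c in part.lower()):
--                 return part
--
--         return "Unknown"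
--
--     except Exception:
--         return "Unknown"
-- ===== SOURCE B (Python) =====
-- def _extract_sha_from_filename(filename: str) -> str:
--     """Single left-to-right scan: track the current dash-delimited segment and
--     whether it is all-hex, instead of building the full split list first."""
--     try:
--         s = filename.replace('.json', '')
--         buf = ''
--         ok = True
--         for c in s:
--             if c == '-':
--                 if ok and len(buf) >= 7:
--                     return buf
--                 buf, ok = '', True
--             else:
--                 buf += c
--                 ok = ok and (c.lower() in '0123456789abcdef')
--         if ok and len(buf) >= 7:
--             return buf
--         return "Unknown"
--     except Exception:
--         return "Unknown"
-- ===== Notes on version B (the rewrite author's own statement) =====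
-- stated objective: alternative
-- what changed: Replaces the split-into-a-list-of-dash-separated-parts-then-scan-parts approach with a single left-to-right character scan that tracks the current dash-delimited segment and an all-hex flag, returning the segment as soon as one qualifies.
import Mathlib
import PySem

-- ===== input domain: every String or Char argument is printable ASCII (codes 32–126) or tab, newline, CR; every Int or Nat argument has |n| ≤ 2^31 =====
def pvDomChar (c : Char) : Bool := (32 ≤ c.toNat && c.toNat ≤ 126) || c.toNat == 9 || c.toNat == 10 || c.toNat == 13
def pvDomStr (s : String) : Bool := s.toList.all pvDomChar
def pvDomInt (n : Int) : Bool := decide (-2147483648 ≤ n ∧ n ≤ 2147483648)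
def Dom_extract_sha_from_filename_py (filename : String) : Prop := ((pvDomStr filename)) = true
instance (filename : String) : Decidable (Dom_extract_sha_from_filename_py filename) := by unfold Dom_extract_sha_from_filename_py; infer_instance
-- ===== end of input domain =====

-- B replaces A's split-into-list-then-loop by a single left-to-right scan that tracks
-- the current dash-delimited segment and its all-hex flag (alternative decomposition).

-- ===== PORT A =====
-- `part.lower()` then `c in '0123456789abcdef'` for each c
def pvHexOkA (part : List Char) : Bool :=
  decide (7 ≤ part.length) &&
    (PySem.Chars.lower part).all (fun c => PySem.Chars.isIn [c] "0123456789abcdef".toList)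

-- the `for part in parts: … return part` loop
def pvLoopA : List (List Char) → String
  | [] => "Unknown"
  | part :: rest => if pvHexOkA part then String.ofList part else pvLoopA rest

def extract_sha_from_filename_py (filename : String) : String :=
  pvLoopA (PySem.Chars.splitOn (PySem.Chars.replace filename.toList ".json".toList []) "-".toList)

-- ===== PORT B =====
-- `c.lower() in '0123456789abcdef'`
def pvHexCharB (c : Char) : Bool :=
  PySem.Chars.isIn [PySem.Chars.lowerChar c] "0123456789abcdef".toList

-- the scan loop of Source B: buf = current segment, ok = buf is all-hex so far
def pvScanB : List Char → List Char → Bool → String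
  | [], buf, ok => if ok && decide (7 ≤ buf.length) then String.ofList buf else "Unknown"
  | c :: rest, buf, ok =>
    if c = '-' then
      if ok && decide (7 ≤ buf.length) then String.ofList buf else pvScanB rest [] true
    else
      pvScanB rest (buf ++ [c]) (ok && pvHexCharB c)

def extract_sha_from_filename_py_alt (filename : String) : String :=
  pvScanB (PySem.Chars.replace filename.toList ".json".toList []) [] true

-- ===== PRECONDITION & SPEC =====
def Spec_extract_sha_from_filename_py (filename : String) (out : String) : Prop := out = extract_sha_from_filename_py_alt filename
instance (filename : String) (out : String) : Decidable (Spec_extract_sha_from_filename_py filename out) := by unfold Spec_extract_sha_from_filename_py; infer_instance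

-- ===== CLAIM (what is proved, stated in full; the proofs are below) =====
def Claim_equal_extract_sha_from_filename_py : Prop := ∀ (filename : String), Dom_extract_sha_from_filename_py filename → Spec_extract_sha_from_filename_py filename (extract_sha_from_filename_py filename)

-- ===== LEMMAS AND PROOFS =====

-- structural single-'-' split that both sides are related to
def pvSplitSimple : List Char → List Char → List (List Char)
  | pre, [] => [pre]
  | pre, c :: rest =>
    if c = '-' then pre :: pvSplitSimple [] rest else pvSplitSimple (pre ++ [c]) rest

theorem pvSplitOn_go_eq (l : List Char) : ∀ (fuel : Nat) (cur : List Char)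
    (acc : List (List Char)), l.length ≤ fuel →
    PySem.Chars.splitOn.go "-".toList fuel l cur acc =
      acc.reverse ++ pvSplitSimple cur.reverse l := by
  induction l with
  | nil =>
    intro fuel cur acc _
    cases fuel <;> simp [PySem.Chars.splitOn.go, pvSplitSimple]
  | cons c rest ih =>
    intro fuel cur acc hf
    cases fuel with
    | zero => simp at hf
    | succ f =>
      by_cases hc : c = '-'
      · subst hc
        rw [show PySem.Chars.splitOn.go "-".toList (f+1) ('-' :: rest) cur acc
              = PySem.Chars.splitOn.go "-".toList f rest [] (cur.reverse :: acc) by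
            simp [PySem.Chars.splitOn.go, List.isPrefixOf]]
        rw [ih f [] (cur.reverse :: acc) (by simpa using hf)]
        simp [pvSplitSimple]
      · rw [show PySem.Chars.splitOn.go "-".toList (f+1) (c :: rest) cur acc
              = PySem.Chars.splitOn.go "-".toList f rest (c :: cur) acc by
            simp [PySem.Chars.splitOn.go, List.isPrefixOf]
            intro h
            exact absurd h.symm hc]
        rw [ih f (c :: cur) acc (by simpa using Nat.le_of_succ_le_succ hf)]
        simp [pvSplitSimple, hc]

theorem pvSplitOn_eq (s : List Char) :
    PySem.Chars.splitOn s "-".toList = pvSplitSimple [] s := by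
  simpa using pvSplitOn_go_eq s (s.length + 1) [] [] (by omega)

theorem pvHexOkA_eq (p : List Char) :
    pvHexOkA p = (decide (7 ≤ p.length) && p.all pvHexCharB) := by
  unfold pvHexOkA pvHexCharB PySem.Chars.lower
  rw [List.all_map]
  rfl

theorem pvScan_eq_loop (cs : List Char) : ∀ (buf : List Char),
    pvScanB cs buf (buf.all pvHexCharB) = pvLoopA (pvSplitSimple buf cs) := by
  induction cs with
  | nil =>
    intro buf
    simp [pvScanB, pvSplitSimple, pvLoopA, pvHexOkA_eq, Bool.and_comm]
  | cons c rest ih =>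
    intro buf
    by_cases hc : c = '-'
    · subst hc
      have h0 : pvScanB rest [] true = pvLoopA (pvSplitSimple [] rest) := by
        simpa using ih []
      simp [pvScanB, pvSplitSimple, pvLoopA, pvHexOkA_eq, Bool.and_comm, h0]
    · have h1 := ih (buf ++ [c])
      simp only [List.all_append, List.all_cons, List.all_nil, Bool.and_true] at h1
      simp [pvScanB, pvSplitSimple, hc, h1]

-- ===== VERDICT (by name: the statement is the Claim_ definition above) =====
theorem extract_sha_from_filename_py_spec : Claim_equal_extract_sha_from_filename_py := by
  intro filename _
  unfold Spec_extract_sha_from_filename_py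
  unfold extract_sha_from_filename_py extract_sha_from_filename_py_alt
  rw [pvSplitOn_eq]
  simpa using (pvScan_eq_loop (PySem.Chars.replace filename.toList ".json".toList []) []).symm
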